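-- pv_equiv track=rewrite | github.com/Sarojkumarpaswan/intro_speech_understanding | lec04/homework4.py | next_birthday
-- ===== SOURCE A (Python) =====
-- def next_birthday(date, birthdays):
--     '''
--     Find the next birthday after the given date.
--
--     @param:
--     date - a tuple of two integers specifying (month, day)
--     birthdays - a dict mapping from date tuples to lists of names
--
--     @return:
--     birthday - the next day, after given date, on which somebody has a birthday
--     list_of_names - list of all people with birthdays on that date
--     '''
--     given_month, given_day = date
--
--     # Convert (month, day) into day-of-year (simple 365-day year)
--     def day_of_year(month, day):
--         days_in_month = [31,28,31,30,31,30,31,31,30,31,30,31]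
--         return sum(days_in_month[:month-1]) + day
--
--     given_doy = day_of_year(given_month, given_day)
--
--     next_doy = None
--     birthday = None
--
--     for bday in birthdays:
--         bday_doy = day_of_year(bday[0], bday[1])
--
--         # Birthday after given date
--         if bday_doy > given_doy:
--             if next_doy is None or bday_doy < next_doy:
--                 next_doy = bday_doy
--                 birthday = bday
--
--     # If no future birthday found, wrap to next year (earliest birthday)
--     if birthday is None:
--         birthday = min(birthdays.keys(), key=lambda d: day_of_year(d[0], d[1]))
--
--     list_of_names = birthdays[birthday]
--     return birthday, list_of_names
-- ===== SOURCE B (Python) =====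
-- def next_birthday(date, birthdays):
--     def day_of_year(month, day):
--         days_in_month = [31,28,31,30,31,30,31,31,30,31,30,31]
--         return sum(days_in_month[:month-1]) + day
--
--     given_doy = day_of_year(*date)
--
--     # One pass: prefer dates strictly after the given day (flag False sorts first),
--     # then the earliest day-of-year; min's tie-breaking keeps the first key in dict order.
--     birthday = min(birthdays,
--                    key=lambda k: (day_of_year(k[0], k[1]) <= given_doy,
--                                   day_of_year(k[0], k[1])))
--     return birthday, birthdays[birthday]
-- ===== Notes on version B (the rewrite author's own statement) =====
-- stated objective: simpler
-- what changed: A's explicit loop tracking (next_doy, birthday) plus a separate wrap-around fallback min over all keys is replaced by a single min over the keys with the composite key (day_of_year <= given_doy, day_of_year), whose lexicographic order makes future dates sort before past ones.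
import Mathlib
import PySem

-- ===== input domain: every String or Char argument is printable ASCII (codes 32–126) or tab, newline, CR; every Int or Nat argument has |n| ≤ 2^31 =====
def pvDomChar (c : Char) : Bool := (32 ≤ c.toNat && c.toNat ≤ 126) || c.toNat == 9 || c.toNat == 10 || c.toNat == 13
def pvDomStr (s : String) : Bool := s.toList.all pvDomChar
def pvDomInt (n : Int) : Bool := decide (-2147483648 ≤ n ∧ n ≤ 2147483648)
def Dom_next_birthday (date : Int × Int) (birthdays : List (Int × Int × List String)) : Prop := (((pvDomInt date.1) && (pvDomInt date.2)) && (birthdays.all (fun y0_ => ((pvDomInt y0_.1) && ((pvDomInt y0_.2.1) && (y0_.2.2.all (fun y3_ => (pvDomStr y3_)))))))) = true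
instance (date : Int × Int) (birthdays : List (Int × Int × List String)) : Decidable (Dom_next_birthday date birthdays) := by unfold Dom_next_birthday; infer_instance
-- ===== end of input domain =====

-- B replaces A's explicit scan-for-future-minimum plus wrap-around fallback pass by a single
-- min(...) over the keys with the composite key (doy <= given_doy, doy); objective: simpler.


-- ===== PORT A =====
-- day_of_year(month, day) = sum(days_in_month[:month-1]) + day  (shared helper of both Pythons)
def pvDayOfYear (month day : Int) : Int :=
  let days_in_month : List Int := [31,28,31,30,31,30,31,31,30,31,30,31]
  (PySem.List.slice days_in_month none (some (month - 1))).sum + day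

-- the Python argument is the dict with keys (month, day): reshape the flattened triples
def pvDict (birthdays : List (Int × Int × List String)) : PySem.Dict (Int × Int) (List String) :=
  PySem.Dict.ofList (birthdays.map (fun p => ((p.1, p.2.1), p.2.2)))

def next_birthday (date : Int × Int) (birthdays : List (Int × Int × List String)) : (Int × Int) × List String :=
  let d := pvDict birthdays
  let given_doy := pvDayOfYear date.1 date.2
  -- for bday in birthdays: track (next_doy, birthday)
  let st := d.keys.foldl
    (fun (st : Option Int × Option (Int × Int)) bday =>
      let bday_doy := pvDayOfYear bday.1 bday.2
      if bday_doy > given_doy then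
        if (match st.1 with | none => true | some nd => decide (bday_doy < nd)) then
          (some bday_doy, some bday)
        else st
      else st)
    (none, none)
  let birthday := match st.2 with
    | some b => b
    -- min(birthdays.keys(), key=...); none = ValueError on an empty dict, excluded by Pre_
    | none => (PySem.List.min? d.keys (fun k => pvDayOfYear k.1 k.2)).getD (0, 0)
  (birthday, d.getD birthday [])              -- birthdays[birthday]; the key is always present

-- ===== PORT B =====
def next_birthday_alt (date : Int × Int) (birthdays : List (Int × Int × List String)) : (Int × Int) × List String :=
  let d := pvDict birthdays
  let given_doy := pvDayOfYear date.1 date.2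
  -- min(birthdays, key=lambda k: (day_of_year(k) <= given_doy, day_of_year(k)))
  match PySem.List.min2? d.keys
      (fun k => decide (pvDayOfYear k.1 k.2 ≤ given_doy))
      (fun k => pvDayOfYear k.1 k.2) with
  | some birthday => (birthday, d.getD birthday [])
  | none => ((0, 0), [])                      -- empty dict: Python's min raises ValueError, excluded by Pre_

-- ===== PRECONDITION & SPEC =====
-- Pre_ excludes only the empty dict, on which both Pythons raise ValueError (min of an empty sequence).
def Pre_next_birthday (date : Int × Int) (birthdays : List (Int × Int × List String)) : Prop :=
  birthdays ≠ []
instance (date : Int × Int) (birthdays : List (Int × Int × List String)) : Decidable (Pre_next_birthday date birthdays) := by unfold Pre_next_birthday; infer_instance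

def pvWitness_next_birthday : (Int × Int) × (List (Int × Int × List String)) :=
  ((6, 15), [(1, 2, ["ann"]), (7, 4, ["bob", "cy"])])

def Spec_next_birthday (date : Int × Int) (birthdays : List (Int × Int × List String)) (out : (Int × Int) × List String) : Prop := out = next_birthday_alt date birthdays
instance (date : Int × Int) (birthdays : List (Int × Int × List String)) (out : (Int × Int) × List String) : Decidable (Spec_next_birthday date birthdays out) := by unfold Spec_next_birthday; infer_instance

-- ===== CLAIM (what is proved, stated in full; the proofs are below) =====
def Claim_equal_next_birthday : Prop := ∀ (date : Int × Int) (birthdays : List (Int × Int × List String)), Dom_next_birthday date birthdays → Pre_next_birthday date birthdays → Spec_next_birthday date birthdays (next_birthday date birthdays)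

-- ===== LEMMAS AND PROOFS =====

-- min?'s fold step (for key f) and min2?'s fold step (for key (f · ≤ gd, f ·)), named for the lemmas
def pvStepM (f : Int × Int → Int) : Option (Int × Int) → (Int × Int) → Option (Int × Int) :=
  fun acc x => match acc with
    | none => some x
    | some m => if f x < f m then some x else some m

def pvStep2 (f : Int × Int → Int) (gd : Int) : Option (Int × Int) → (Int × Int) → Option (Int × Int) :=
  fun acc x => match acc with
    | none => some x
    | some m =>
      if (decide (decide (f x ≤ gd) < decide (f m ≤ gd)) ||
          !decide (decide (f m ≤ gd) < decide (f x ≤ gd)) && decide (f x < f m)) = true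
      then some x else some m

theorem pvMin?_eq_foldl (f : Int × Int → Int) (l : List (Int × Int)) :
    PySem.List.min? l f = l.foldl (pvStepM f) none := by
  unfold PySem.List.min? pvStepM
  congr 1; funext acc x; cases acc <;> rfl

theorem pvMin2?_eq_foldl (f : Int × Int → Int) (gd : Int) (l : List (Int × Int)) :
    PySem.List.min2? l (fun k => decide (f k ≤ gd)) f = l.foldl (pvStep2 f gd) none := by
  unfold PySem.List.min2? pvStep2
  congr 1; funext acc x; cases acc <;> rfl

-- A's joint accumulator (next_doy, birthday) is the min?-fold with its key alongside
theorem pvPairFold (f : Int × Int → Int) (l : List (Int × Int)) (b : Option (Int × Int)) :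
    l.foldl (fun st x =>
        if (match st.1 with | none => true | some nd => decide (f x < nd)) then
          (some (f x), some x)
        else st) (Option.map f b, b)
      = (Option.map f (l.foldl (pvStepM f) b), l.foldl (pvStepM f) b) := by
  induction l generalizing b with
  | nil => rfl
  | cons x t ih =>
    cases b with
    | none => simpa using ih (some x)
    | some m =>
      by_cases h : f x < f m
      · simp [pvStepM, h, List.foldl_cons, ← ih (some x)]
      · simp [pvStepM, h, List.foldl_cons, ← ih (some m)]

-- once the running min2? state is a future date, past dates never replace it
theorem pvStep2_future (f : Int × Int → Int) (gd : Int) (l : List (Int × Int)) (m : Int × Int)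
    (hm : gd < f m) :
    l.foldl (pvStep2 f gd) (some m)
      = (l.filter (fun y => decide (gd < f y))).foldl (pvStepM f) (some m) := by
  induction l generalizing m with
  | nil => rfl
  | cons x t ih =>
    by_cases hx : gd < f x
    · rw [List.filter_cons, show decide (gd < f x) = true by simp [hx]]
      by_cases hlt : f x < f m
      · have : pvStep2 f gd (some m) x = some x := by
          simp [pvStep2, not_le.mpr hm, not_le.mpr hx, hlt]
        simp [this, pvStepM, hlt, ih x hx]
      · have : pvStep2 f gd (some m) x = some m := by
          simp [pvStep2, not_le.mpr hm, not_le.mpr hx, hlt]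
        simp [this, pvStepM, hlt, ih m hm]
    · rw [List.filter_cons, show decide (gd < f x) = false by simp [hx]]
      have : pvStep2 f gd (some m) x = some m := by
        simp [pvStep2, not_le.mpr hm, not_lt.mp hx]
      simp [this, ih m hm]

-- with a past date as state, min2? behaves as: plain min? until a future date shows up
theorem pvStep2_past (f : Int × Int → Int) (gd : Int) (l : List (Int × Int)) (m : Int × Int)
    (hm : ¬ gd < f m) :
    l.foldl (pvStep2 f gd) (some m)
      = if l.filter (fun y => decide (gd < f y)) = [] then l.foldl (pvStepM f) (some m)
        else (l.filter (fun y => decide (gd < f y))).foldl (pvStepM f) none := by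
  induction l generalizing m with
  | nil => rfl
  | cons x t ih =>
    by_cases hx : gd < f x
    · rw [List.filter_cons, show decide (gd < f x) = true by simp [hx]]
      have : pvStep2 f gd (some m) x = some x := by
        simp [pvStep2, not_le.mpr hx, not_lt.mp hm]
      simp [this, pvStep2_future f gd t x hx, pvStepM]
    · rw [List.filter_cons, show decide (gd < f x) = false by simp [hx]]
      by_cases hlt : f x < f m
      · have : pvStep2 f gd (some m) x = some x := by
          simp [pvStep2, not_lt.mp hm, not_lt.mp hx, hlt]
        simp [this, pvStepM, hlt, ih x hx]
      · have : pvStep2 f gd (some m) x = some m := by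
          simp [pvStep2, not_lt.mp hm, not_lt.mp hx, hlt]
        simp [this, pvStepM, hlt, ih m hm]

theorem pvStep2_none (f : Int × Int → Int) (gd : Int) (l : List (Int × Int)) :
    l.foldl (pvStep2 f gd) none
      = if l.filter (fun y => decide (gd < f y)) = [] then l.foldl (pvStepM f) none
        else (l.filter (fun y => decide (gd < f y))).foldl (pvStepM f) none := by
  cases l with
  | nil => rfl
  | cons x t =>
    have h1 : (x :: t).foldl (pvStep2 f gd) none = t.foldl (pvStep2 f gd) (some x) := rfl
    by_cases hx : gd < f x
    · rw [List.filter_cons, show decide (gd < f x) = true by simp [hx]]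
      simp [h1, pvStep2_future f gd t x hx, pvStepM]
    · rw [List.filter_cons, show decide (gd < f x) = false by simp [hx]]
      simp [h1, pvStep2_past f gd t x hx, pvStepM]

theorem pvKeys_ne_nil (birthdays : List (Int × Int × List String)) (h : birthdays ≠ []) :
    (pvDict birthdays).keys ≠ [] := by
  cases birthdays with
  | nil => exact absurd rfl h
  | cons p t =>
    have : (pvDict (p :: t)).keys
        = PySem.Set.ofList (((p :: t).map (fun q => ((q.1, q.2.1), q.2.2))).map (·.1)) := by
      have := PySem.Dict.keys_foldl_insert_key (ν := List String)
        ((p :: t).map (fun q => ((q.1, q.2.1), q.2.2))) (fun q => q.1) (fun _ q => q.2)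
        PySem.Dict.empty
      simpa [pvDict, PySem.Dict.ofList, PySem.Dict.update, PySem.Set.update_nil_left] using this
    simp [this, PySem.Set.ofList_cons]

-- ===== VERDICT (by name: the statement is the Claim_ definition above) =====
theorem next_birthday_spec : Claim_equal_next_birthday := by
  intro date birthdays _ hpre
  unfold Spec_next_birthday next_birthday next_birthday_alt
  dsimp only []
  have hkne : (pvDict birthdays).keys ≠ [] := pvKeys_ne_nil birthdays hpre
  generalize hgen : (pvDict birthdays).keys = ks at hkne ⊢
  have hA : List.foldl
      (fun (st : Option Int × Option (Int × Int)) bday =>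
        if pvDayOfYear bday.1 bday.2 > pvDayOfYear date.1 date.2 then
          if (match st.1 with
              | none => true
              | some nd => decide (pvDayOfYear bday.1 bday.2 < nd)) = true then
            (some (pvDayOfYear bday.1 bday.2), some bday)
          else st
        else st) (none, none) ks
      = (Option.map (fun k => pvDayOfYear k.1 k.2)
           (List.foldl (pvStepM (fun k => pvDayOfYear k.1 k.2)) none
             (List.filter (fun y => decide (pvDayOfYear date.1 date.2 < pvDayOfYear y.1 y.2)) ks)),
         List.foldl (pvStepM (fun k => pvDayOfYear k.1 k.2)) none
           (List.filter (fun y => decide (pvDayOfYear date.1 date.2 < pvDayOfYear y.1 y.2)) ks)) :=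
    (PySem.List.foldl_ite_eq_foldl_filter _ _ ks (none, none)).trans
      (pvPairFold (fun k => pvDayOfYear k.1 k.2)
        (List.filter (fun y => decide (pvDayOfYear date.1 date.2 < pvDayOfYear y.1 y.2)) ks) none)
  have hB : PySem.List.min2? ks (fun k => decide (pvDayOfYear k.1 k.2 ≤ pvDayOfYear date.1 date.2))
        (fun k => pvDayOfYear k.1 k.2)
      = if List.filter (fun y => decide (pvDayOfYear date.1 date.2 < pvDayOfYear y.1 y.2)) ks = []
        then List.foldl (pvStepM (fun k => pvDayOfYear k.1 k.2)) none ks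
        else List.foldl (pvStepM (fun k => pvDayOfYear k.1 k.2)) none
          (List.filter (fun y => decide (pvDayOfYear date.1 date.2 < pvDayOfYear y.1 y.2)) ks) :=
    (pvMin2?_eq_foldl (fun k => pvDayOfYear k.1 k.2) (pvDayOfYear date.1 date.2) ks).trans
      (pvStep2_none (fun k => pvDayOfYear k.1 k.2) (pvDayOfYear date.1 date.2) ks)
  rw [hA, hB]
  by_cases hemp :
      List.filter (fun y => decide (pvDayOfYear date.1 date.2 < pvDayOfYear y.1 y.2)) ks = []
  · -- no future birthday: both sides are the plain minimum over all keys
    have hmin : ∃ m, List.foldl (pvStepM (fun k => pvDayOfYear k.1 k.2)) none ks = some m := by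
      have h0 := PySem.List.min?_eq_none_iff ks (fun k => pvDayOfYear k.1 k.2)
      rw [pvMin?_eq_foldl] at h0
      cases h : List.foldl (pvStepM (fun k => pvDayOfYear k.1 k.2)) none ks with
      | none => exact absurd (h0.mp h) hkne
      | some m => exact ⟨m, rfl⟩
    rcases hmin with ⟨m, hm⟩
    rw [hemp, if_pos rfl]
    simp [pvMin?_eq_foldl, hm]
  · have hmin : ∃ m, List.foldl (pvStepM (fun k => pvDayOfYear k.1 k.2)) none
        (List.filter (fun y => decide (pvDayOfYear date.1 date.2 < pvDayOfYear y.1 y.2)) ks) = some m := by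
      have h0 := PySem.List.min?_eq_none_iff
        (List.filter (fun y => decide (pvDayOfYear date.1 date.2 < pvDayOfYear y.1 y.2)) ks)
        (fun k => pvDayOfYear k.1 k.2)
      rw [pvMin?_eq_foldl] at h0
      cases h : List.foldl (pvStepM (fun k => pvDayOfYear k.1 k.2)) none
          (List.filter (fun y => decide (pvDayOfYear date.1 date.2 < pvDayOfYear y.1 y.2)) ks) with
      | none => exact absurd (h0.mp h) hemp
      | some m => exact ⟨m, rfl⟩
    rcases hmin with ⟨m, hm⟩
    rw [if_neg hemp, hm]
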